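-- pv_equiv track=rewrite | github.com/mortyc126-debug/SHA-256 | exp105_carry_survival_patterns.py | carry_bits
-- ===== SOURCE A (Python) =====
-- def carry_bits(a, b):
--     """Return all 32 carry bits for a+b."""
--     c = 0
--     carries = []
--     for i in range(32):
--         ai = (a >> i) & 1; bi = (b >> i) & 1
--         c = (ai & bi) | ((ai ^ bi) & c)
--         carries.append(c)
--     return carries
-- ===== SOURCE B (Python) =====
-- def carry_bits(a, b):
--     """Return all 32 carry bits for a+b."""
--     a &= 0xFFFFFFFF
--     b &= 0xFFFFFFFF
--     x = (a ^ b ^ (a + b)) >> 1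
--     return [(x >> i) & 1 for i in range(32)]
-- ===== Notes on version B (the rewrite author's own statement) =====
-- stated objective: idiomatic
-- what changed: Replaces the 32-step ripple-carry recurrence with the closed-form carry-XOR identity: mask both operands to 32 bits, compute (a ^ b ^ (a+b)) >> 1 once, and read its 32 low bits.
import Mathlib
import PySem

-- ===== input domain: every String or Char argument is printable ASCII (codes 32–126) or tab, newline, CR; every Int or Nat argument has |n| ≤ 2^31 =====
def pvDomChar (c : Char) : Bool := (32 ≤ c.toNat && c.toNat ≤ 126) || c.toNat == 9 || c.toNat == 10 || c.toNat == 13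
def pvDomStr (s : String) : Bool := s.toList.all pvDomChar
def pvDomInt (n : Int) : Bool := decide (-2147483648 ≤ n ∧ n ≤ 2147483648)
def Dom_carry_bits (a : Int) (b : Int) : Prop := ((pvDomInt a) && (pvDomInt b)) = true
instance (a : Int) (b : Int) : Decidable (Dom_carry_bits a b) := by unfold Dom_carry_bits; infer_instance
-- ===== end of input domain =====

-- B replaces A's 32-step ripple-carry recurrence by the closed-form carry-XOR identity
-- (mask to 32 bits, compute (a ^ b ^ (a+b)) >> 1 once, read its low 32 bits); same values, no speed claim.

-- ===== PORT A =====
-- the loop body; i ∈ [0,32) so the Int shift amount is nonnegative, exactly as in Python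
def carry_bits (a : Int) (b : Int) : List Int :=
  ((PySem.List.pyRange 0 32 1).foldl
    (fun (st : Int × List Int) (i : Int) =>
      let ai := PySem.Int.band (a >>> i) 1
      let bi := PySem.Int.band (b >>> i) 1
      let c := PySem.Int.bor (PySem.Int.band ai bi) (PySem.Int.band (PySem.Int.bxor ai bi) st.1)
      (c, st.2 ++ [c]))
    ((0 : Int), ([] : List Int))).2

-- ===== PORT B =====
def carry_bits_alt (a : Int) (b : Int) : List Int :=
  let am := PySem.Int.band a 4294967295
  let bm := PySem.Int.band b 4294967295
  let x := (PySem.Int.bxor (PySem.Int.bxor am bm) (am + bm)) >>> (1 : Int)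
  (PySem.List.pyRange 0 32 1).map (fun i => PySem.Int.band (x >>> i) 1)

-- ===== PRECONDITION & SPEC =====
def Spec_carry_bits (a : Int) (b : Int) (out : List Int) : Prop := out = carry_bits_alt a b
instance (a : Int) (b : Int) (out : List Int) : Decidable (Spec_carry_bits a b out) := by unfold Spec_carry_bits; infer_instance

-- ===== CLAIM (what is proved, stated in full; the proofs are below) =====
def Claim_equal_carry_bits : Prop := ∀ (a : Int) (b : Int), Dom_carry_bits a b → Spec_carry_bits a b (carry_bits a b)

-- ===== LEMMAS AND PROOFS =====

-- Python's `v & 0xFFFFFFFF` is `v mod 2^32` for every v ≥ -2^32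
lemma pvMask (a : Int) (h : -4294967296 ≤ a) :
    PySem.Int.band a 4294967295 = a % 4294967296 := by
  unfold PySem.Int.band
  split_ifs with h0 hb hb2
  · have hx : a.toNat &&& (4294967295 : Int).toNat = a.toNat % 4294967296 := by
      have h1 : (4294967295 : Int).toNat = 2 ^ 32 - 1 := by decide
      rw [h1, Nat.and_two_pow_sub_one_eq_mod]
    rw [hx]; omega
  · exact absurd (by norm_num) hb
  · have hlt : (-a - 1).toNat < 2 ^ 32 := by omega
    have hx : (4294967295 : Int).toNat &&& (-a - 1).toNat = (-a - 1).toNat := by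
      have h1 : (4294967295 : Int).toNat = 2 ^ 32 - 1 := by decide
      rw [h1, Nat.and_comm, Nat.and_two_pow_sub_one_eq_mod, Nat.mod_eq_of_lt hlt]
    rw [hx]; omega
  · exact absurd (by norm_num) hb2

-- bit i of a (read as Python does, `(a >> i) & 1`) is bit i of a mod 2^32, for i < 32
lemma pvBitA (a : Int) (i : Nat) (hi : i < 32) :
    PySem.Int.band (a >>> (i : Int)) 1 =
      if ((a % 4294967296).toNat).testBit i then 1 else 0 := by
  rw [Int.shiftRight_natCast_right, Int.shiftRight_eq_div_pow, PySem.Int.band_one,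
    PySem.Int.mod_eq_emod_of_pos (by norm_num)]
  rw [show ((2 ^ i : Nat) : Int) = (2 : Int) ^ i by push_cast; ring]
  set X : Nat := (a % 4294967296).toNat with hXdef
  set K : Int := a / 4294967296 with hK
  have hpow : ((2 : Int) ^ (31 - i) * 2) * 2 ^ i = 4294967296 := by
    have h1 : (2 : Int) ^ (31 - i) * 2 * 2 ^ i = 2 ^ ((31 - i) + 1 + i) := by ring
    have h2 : (31 - i) + 1 + i = 32 := by omega
    rw [h1, h2]; norm_num
  have hXeq : a = (X : Int) + (2 ^ (31 - i) * 2 * K) * 2 ^ i := by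
    have h1 := Int.emod_add_mul_ediv a 4294967296
    have h2 : 0 ≤ a % 4294967296 := Int.emod_nonneg a (by norm_num)
    have h3 : (2 ^ (31 - i) * 2 * K) * 2 ^ i = 4294967296 * K := by rw [← hpow]; ring
    rw [h3]; omega
  have hc : ((2 : Int) ^ i) ≠ 0 := by positivity
  conv_lhs => rw [hXeq]
  rw [Int.add_mul_ediv_right _ _ hc,
    show (2 : Int) ^ (31 - i) * 2 * K = 2 * (2 ^ (31 - i) * K) by ring,
    Int.add_mul_emod_self_left,
    show ((2 : Int) ^ i) = ((2 ^ i : Nat) : Int) by push_cast; ring,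
    ← Int.natCast_div, Nat.testBit_eq_decide_div_mod_eq]
  rcases Nat.mod_two_eq_zero_or_one (X / 2 ^ i) with h | h <;> simp [h] <;>
    rw [show ((2 : Int) ^ i) = ((2 ^ i : Nat) : Int) by push_cast; ring, ← Int.natCast_div] <;>
      omega

-- the closed-form identity: bit (i+1) of x ^ y ^ (x+y) is the carry out of bit i
lemma pvCI (X Y i : Nat) :
    (X ^^^ Y ^^^ (X + Y)).testBit (i + 1)
      = decide (2 ^ (i + 1) ≤ X % 2 ^ (i + 1) + Y % 2 ^ (i + 1)) := by
  have hp : 0 < 2 ^ (i + 1) := Nat.two_pow_pos _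
  rw [Nat.testBit_xor, Nat.testBit_xor, Nat.testBit_eq_decide_div_mod_eq,
    Nat.testBit_eq_decide_div_mod_eq, Nat.testBit_eq_decide_div_mod_eq, Nat.add_div hp]
  rcases Nat.mod_two_eq_zero_or_one (X / 2 ^ (i + 1)) with h1 | h1 <;>
    rcases Nat.mod_two_eq_zero_or_one (Y / 2 ^ (i + 1)) with h2 | h2 <;>
      split_ifs with hc <;> simp [h1, h2, hc, Nat.add_mod]

-- the ripple-carry recurrence, step case
lemma pvREC (X Y i : Nat) :
    decide (2 ^ (i + 1 + 1) ≤ X % 2 ^ (i + 1 + 1) + Y % 2 ^ (i + 1 + 1))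
      = ((X.testBit (i + 1) && Y.testBit (i + 1)) ||
         ((X.testBit (i + 1)).xor (Y.testBit (i + 1)) &&
          decide (2 ^ (i + 1) ≤ X % 2 ^ (i + 1) + Y % 2 ^ (i + 1)))) := by
  have hp : 0 < 2 ^ (i + 1) := Nat.two_pow_pos _
  have hX := Nat.mod_lt X hp
  have hY := Nat.mod_lt Y hp
  have hdX : X % 2 ^ (i + 1 + 1) = X % 2 ^ (i + 1) + 2 ^ (i + 1) * (X / 2 ^ (i + 1) % 2) :=
    Nat.mod_pow_succ
  have hdY : Y % 2 ^ (i + 1 + 1) = Y % 2 ^ (i + 1) + 2 ^ (i + 1) * (Y / 2 ^ (i + 1) % 2) :=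
    Nat.mod_pow_succ
  have hpw : 2 ^ (i + 1 + 1) = 2 ^ (i + 1) * 2 := pow_succ 2 (i + 1)
  rw [hdX, hdY, hpw, Nat.testBit_eq_decide_div_mod_eq, Nat.testBit_eq_decide_div_mod_eq]
  rcases Nat.mod_two_eq_zero_or_one (X / 2 ^ (i + 1)) with h1 | h1 <;>
    rcases Nat.mod_two_eq_zero_or_one (Y / 2 ^ (i + 1)) with h2 | h2 <;>
      simp [h1, h2, decide_eq_decide] <;> omega

-- the ripple-carry recurrence, base case
lemma pvREC0 (X Y : Nat) :
    decide (2 ^ 1 ≤ X % 2 ^ 1 + Y % 2 ^ 1) = (X.testBit 0 && Y.testBit 0) := by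
  rw [Nat.testBit_eq_decide_div_mod_eq, Nat.testBit_eq_decide_div_mod_eq]
  rcases Nat.mod_two_eq_zero_or_one X with h1 | h1 <;>
    rcases Nat.mod_two_eq_zero_or_one Y with h2 | h2 <;> simp [h1, h2, pow_one]

-- A's combining step on 0/1 values, as a Boolean table
lemma pvComb (u v w : Bool) :
    PySem.Int.bor (PySem.Int.band (if u then 1 else 0) (if v then 1 else 0))
        (PySem.Int.band (PySem.Int.bxor (if u then 1 else 0) (if v then 1 else 0)) (if w then 1 else 0))
      = if (u && v) || (u.xor v && w) then 1 else 0 := by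
  cases u <;> cases v <;> cases w <;> decide

-- the loop body of port A, as a named function (definitionally the same lambda)
def pvStep (a b : Int) : (Int × List Int) → Int → (Int × List Int) :=
  fun st i =>
    let ai := PySem.Int.band (a >>> i) 1
    let bi := PySem.Int.band (b >>> i) 1
    let c := PySem.Int.bor (PySem.Int.band ai bi) (PySem.Int.band (PySem.Int.bxor ai bi) st.1)
    (c, st.2 ++ [c])

-- B's per-index bit read, on a nonnegative value, is a testBit
lemma pvBitB (S i : Nat) :
    PySem.Int.band (((S : Int) >>> (1 : Int)) >>> ((i : Nat) : Int)) 1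
      = if S.testBit (i + 1) then 1 else 0 := by
  have hsh : ∀ (m k : Nat), (m : Int) >>> ((k : Nat) : Int) = ((m >>> k : Nat) : Int) := by
    intro m k
    rw [Int.shiftRight_natCast_right, Int.shiftRight_eq_div_pow, Nat.shiftRight_eq_div_pow,
      ← Int.natCast_div]
  rw [show (1 : Int) = ((1 : Nat) : Int) by norm_num, hsh S 1, hsh _ i,
    PySem.Int.band_natCast, Nat.and_one_is_mod, ← Nat.shiftRight_add,
    show 1 + i = i + 1 by omega]
  have hmb : (S >>> (i + 1)) % 2 = (S.testBit (i + 1)).toNat := by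
    rw [Nat.toNat_testBit, Nat.shiftRight_eq_div_pow]
  rw [hmb]
  cases S.testBit (i + 1) <;> simp

-- the carry state after n iterations: 0 initially, afterwards bit n of x^y^(x+y)
def pvCarr (X Y n : Nat) : Int :=
  if n = 0 then 0 else (if (X ^^^ Y ^^^ (X + Y)).testBit n then 1 else 0)

-- loop invariant for port A's fold, expressed through the closed form
lemma pvINV (a b : Int) (X Y : Nat)
    (hA : ∀ i : Nat, i < 32 → PySem.Int.band (a >>> ((i : Nat) : Int)) 1 = if X.testBit i then 1 else 0)
    (hB : ∀ i : Nat, i < 32 → PySem.Int.band (b >>> ((i : Nat) : Int)) 1 = if Y.testBit i then 1 else 0) :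
    ∀ n : Nat, n ≤ 32 →
      (PySem.List.pyRange 0 (n : Int) 1).foldl (pvStep a b) (0, []) =
        (pvCarr X Y n,
         (PySem.List.pyRange 0 (n : Int) 1).map
           (fun i => if (X ^^^ Y ^^^ (X + Y)).testBit (i.toNat + 1) then (1 : Int) else 0)) := by
  intro n
  induction n with
  | zero => intro _; simp [PySem.List.pyRange_one_eq_nil (by norm_num : (0:Int) ≤ 0), pvCarr]
  | succ k ih =>
    intro hk
    have hk32 : k < 32 := by omega
    have hsplit : PySem.List.pyRange 0 ((k + 1 : Nat) : Int) 1
        = PySem.List.pyRange 0 (k : Nat) 1 ++ [((k : Nat) : Int)] := by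
      rw [PySem.List.pyRange_one_append 0 (k : Nat) ((k + 1 : Nat) : Int) (by positivity) (by push_cast; omega),
        PySem.List.pyRange_one_cons (a := ((k : Nat) : Int)) (b := ((k + 1 : Nat) : Int)) (by push_cast; omega),
        PySem.List.pyRange_one_eq_nil (a := ((k : Nat) : Int) + 1) (b := ((k + 1 : Nat) : Int)) (by push_cast; omega)]
    rw [hsplit, List.foldl_append, List.map_append, ih (by omega)]
    have hcomb := pvComb (X.testBit k) (Y.testBit k)
    have hw : pvCarr X Y k = if (k ≠ 0 && (X ^^^ Y ^^^ (X + Y)).testBit k) then (1:Int) else 0 := by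
      rcases Nat.eq_zero_or_pos k with h | h
      · simp [pvCarr, h]
      · simp [pvCarr, h.ne']
    have hnew : (X ^^^ Y ^^^ (X + Y)).testBit (k + 1)
        = ((X.testBit k && Y.testBit k) ||
           ((X.testBit k).xor (Y.testBit k) && (k ≠ 0 && (X ^^^ Y ^^^ (X + Y)).testBit k))) := by
      rcases Nat.eq_zero_or_pos k with h0 | h0
      · subst h0
        rw [pvCI X Y 0, pvREC0 X Y]
        simp
      · obtain ⟨j, rfl⟩ : ∃ j, k = j + 1 := ⟨k - 1, by omega⟩
        rw [pvCI X Y (j + 1), pvREC X Y j, ← pvCI X Y j]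
        simp
    simp only [List.foldl_cons, List.foldl_nil, List.map_cons, List.map_nil, pvStep]
    rw [hA k hk32, hB k hk32, hw, hcomb, ← hnew]
    unfold pvCarr
    simp

theorem carry_bits_spec : Claim_equal_carry_bits := by
  intro a b hdom
  unfold Spec_carry_bits
  have hbound : -2147483648 ≤ a ∧ a ≤ 2147483648 ∧ -2147483648 ≤ b ∧ b ≤ 2147483648 := by
    unfold Dom_carry_bits pvDomInt at hdom
    simp at hdom
    omega
  set X : Nat := (a % 4294967296).toNat with hXdef
  set Y : Nat := (b % 4294967296).toNat with hYdef
  have hma : PySem.Int.band a 4294967295 = (X : Int) := by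
    rw [pvMask a (by omega)]
    have := Int.emod_nonneg a (show (4294967296:Int) ≠ 0 by norm_num)
    omega
  have hmb : PySem.Int.band b 4294967295 = (Y : Int) := by
    rw [pvMask b (by omega)]
    have := Int.emod_nonneg b (show (4294967296:Int) ≠ 0 by norm_num)
    omega
  have hBalt : carry_bits_alt a b
      = (PySem.List.pyRange 0 32 1).map
          (fun i => if (X ^^^ Y ^^^ (X + Y)).testBit (i.toNat + 1) then (1 : Int) else 0) := by
    show (PySem.List.pyRange 0 32 1).map
        (fun i => PySem.Int.band
          (((PySem.Int.bxor (PySem.Int.bxor (PySem.Int.band a 4294967295) (PySem.Int.band b 4294967295))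
            ((PySem.Int.band a 4294967295) + (PySem.Int.band b 4294967295))) >>> (1 : Int)) >>> i) 1) = _
    rw [hma, hmb]
    rw [show PySem.Int.bxor (PySem.Int.bxor (X : Int) (Y : Int)) ((X : Int) + (Y : Int))
        = ((X ^^^ Y ^^^ (X + Y) : Nat) : Int) by
      rw [show ((X : Int) + (Y : Int)) = ((X + Y : Nat) : Int) by push_cast; ring,
        PySem.Int.bxor_natCast, PySem.Int.bxor_natCast]]
    apply List.map_congr_left
    intro i hi
    have hnn : 0 ≤ i ∧ i < 32 := by
      have : PySem.List.pyRange 0 32 1 = [0,1,2,3,4,5,6,7,8,9,10,11,12,13,14,15,16,17,18,19,20,21,22,23,24,25,26,27,28,29,30,31] := by decide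
      rw [this] at hi
      fin_cases hi <;> norm_num
    obtain ⟨j, rfl⟩ : ∃ j : Nat, i = (j : Int) := ⟨i.toNat, by omega⟩
    rw [pvBitB]
    simp
  have hA : ∀ i : Nat, i < 32 → PySem.Int.band (a >>> ((i : Nat) : Int)) 1 = if X.testBit i then 1 else 0 := by
    intro i hi; exact pvBitA a i hi
  have hB : ∀ i : Nat, i < 32 → PySem.Int.band (b >>> ((i : Nat) : Int)) 1 = if Y.testBit i then 1 else 0 := by
    intro i hi; exact pvBitA b i hi
  have hinv := pvINV a b X Y hA hB 32 (by norm_num)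
  have hfold : carry_bits a b
      = ((PySem.List.pyRange 0 ((32 : Nat) : Int) 1).foldl (pvStep a b) (0, [])).2 := rfl
  rw [hfold, hinv, hBalt]
  norm_num
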